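-- pv_equiv track=rewrite | github.com/alexespencer/euler | src/euler/solutions/p92.py | add_to_chain_lookup
-- ===== SOURCE A (Python) =====
-- def digit_square_sum(n):
--     sum = 0
--
--     for c in str(n):
--         sum += int(c) ** 2
--
--     return sum
--
-- def add_to_chain_lookup(n, chain_cache):
--     if n not in chain_cache:
--         dssum = digit_square_sum(n)
--         chain_cache[n] = dssum
--         if dssum not in chain_cache:
--             add_to_chain_lookup(dssum, chain_cache)
--         return dssum
--     else:
--         return chain_cache[n]
-- ===== SOURCE B (Python) =====
-- def digit_square_sum(n):
--     # arithmetic digit extraction instead of string conversion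
--     s = 0
--     while n > 0:
--         n, d = divmod(n, 10)
--         s += d * d
--     return s
--
-- def add_to_chain_lookup(n, chain_cache):
--     if n in chain_cache:
--         return chain_cache[n]
--     first = digit_square_sum(n)
--     cur = n
--     while cur not in chain_cache:
--         d = digit_square_sum(cur)
--         chain_cache[cur] = d
--         cur = d
--     return first
-- ===== Notes on version B (the rewrite author's own statement) =====
-- stated objective: alternative
-- what changed: Replaces the tail recursion by an explicit forward loop over the transition chain and computes the digit-square-sum arithmetically with divmod instead of iterating over str(n).
import Mathlib
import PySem

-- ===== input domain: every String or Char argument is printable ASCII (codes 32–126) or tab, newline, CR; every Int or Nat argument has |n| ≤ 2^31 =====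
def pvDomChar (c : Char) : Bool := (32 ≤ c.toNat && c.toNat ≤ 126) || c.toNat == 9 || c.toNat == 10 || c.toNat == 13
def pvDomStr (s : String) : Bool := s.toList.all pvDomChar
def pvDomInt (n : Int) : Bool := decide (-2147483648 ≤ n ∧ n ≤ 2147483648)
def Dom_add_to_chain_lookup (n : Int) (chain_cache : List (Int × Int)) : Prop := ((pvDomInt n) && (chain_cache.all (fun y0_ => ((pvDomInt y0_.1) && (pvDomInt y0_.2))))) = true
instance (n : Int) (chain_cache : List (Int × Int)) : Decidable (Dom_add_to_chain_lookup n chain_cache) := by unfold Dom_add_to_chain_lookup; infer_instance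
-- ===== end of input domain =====

-- B walks the transition chain with an explicit loop (instead of tail recursion) and computes the
-- digit-square-sum arithmetically via divmod (instead of iterating over str(n)); equivalence is about
-- the RETURN value only (both Pythons mutate chain_cache identically).


-- ===== PORT A =====
-- str(n)-based digit square sum: sum of int(c)**2 over the characters of str(n)
def digit_square_sum (n : Int) : Int :=
  (PySem.Int.toStr n).toList.foldl
    (fun sum c => sum + ((PySem.Int.ofStr? (String.singleton c)).getD 0) ^ 2) 0

-- A's recursion, threading the mutated dict; fuel only makes the recursion total
-- (the returned Int never depends on the recursive call, whose sole effect is on the dict)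
def addA (fuel : Nat) (n : Int) (cache : PySem.Dict Int Int) : Int × PySem.Dict Int Int :=
  if cache.contains n = false then
    let dssum := digit_square_sum n
    let c1 := cache.insert n dssum
    if c1.contains dssum = false then
      match fuel with
      | 0 => (dssum, c1)
      | Nat.succ f => (dssum, (addA f dssum c1).2)
    else (dssum, c1)
  else ((cache.get? n).getD 0, cache)

def add_to_chain_lookup (n : Int) (chain_cache : List (Int × Int)) : Int :=
  (addA 1000 n (PySem.Dict.mk chain_cache)).1

-- ===== PORT B =====
-- divmod-based digit square sum: while n > 0: n, d = divmod(n, 10); s += d * d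
def dss_go (n s : Int) : Int :=
  if 0 < n then dss_go (PySem.Int.floordiv n 10) (s + PySem.Int.mod n 10 * PySem.Int.mod n 10)
  else s
termination_by n.toNat
decreasing_by
  rw [PySem.Int.floordiv_eq_ediv_of_pos (by norm_num)]
  omega

def digit_square_sum_b (n : Int) : Int := dss_go n 0

-- B's forward chain walk (while cur not in cache: insert cur -> dss(cur)); fuel makes it total
def walkB (fuel : Nat) (cur : Int) (cache : PySem.Dict Int Int) : PySem.Dict Int Int :=
  match fuel with
  | 0 => cache
  | Nat.succ f =>
    if cache.contains cur then cache
    else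
      let d := digit_square_sum_b cur
      walkB f d (cache.insert cur d)

def add_to_chain_lookup_alt (n : Int) (chain_cache : List (Int × Int)) : Int :=
  let cache := PySem.Dict.mk chain_cache
  match cache.get? n with
  | some v => v
  | none =>
    let first := digit_square_sum_b n
    let _ := walkB 1000 n cache
    first

-- ===== PRECONDITION & SPEC =====
-- Pre_ excludes exactly the inputs where Python A raises: a negative n absent from the cache
-- makes digit_square_sum call int('-'), a ValueError.
def Pre_add_to_chain_lookup (n : Int) (chain_cache : List (Int × Int)) : Prop :=
  0 ≤ n ∨ n ∈ chain_cache.map Prod.fst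
instance (n : Int) (chain_cache : List (Int × Int)) : Decidable (Pre_add_to_chain_lookup n chain_cache) := by unfold Pre_add_to_chain_lookup; infer_instance

def pvWitness_add_to_chain_lookup : Int × (List (Int × Int)) := (19, [(44, 32)])

def Spec_add_to_chain_lookup (n : Int) (chain_cache : List (Int × Int)) (out : Int) : Prop := out = add_to_chain_lookup_alt n chain_cache
instance (n : Int) (chain_cache : List (Int × Int)) (out : Int) : Decidable (Spec_add_to_chain_lookup n chain_cache out) := by unfold Spec_add_to_chain_lookup; infer_instance

-- ===== CLAIM (what is proved, stated in full; the proofs are below) =====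
def Claim_equal_add_to_chain_lookup : Prop := ∀ (n : Int) (chain_cache : List (Int × Int)), Dom_add_to_chain_lookup n chain_cache → Pre_add_to_chain_lookup n chain_cache → Spec_add_to_chain_lookup n chain_cache (add_to_chain_lookup n chain_cache)

-- ===== LEMMAS AND PROOFS =====

-- dss_go accumulates: the accumulator adds on the outside
theorem dss_go_shift (k : Nat) : ∀ (n s t : Int), n.toNat = k → dss_go n (s + t) = s + dss_go n t := by
  induction k using Nat.strong_induction_on with
  | _ k ih =>
    intro n s t hk
    conv_lhs => rw [dss_go]
    conv_rhs => rw [dss_go]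
    split_ifs with h
    · have h10 : PySem.Int.floordiv n 10 = n / 10 :=
        PySem.Int.floordiv_eq_ediv_of_pos (by norm_num)
      have hlt : (PySem.Int.floordiv n 10).toNat < k := by rw [h10]; omega
      rw [add_assoc, ih _ hlt _ _ _ rfl]
    · rfl

theorem dss_go_acc (n s : Int) : dss_go n s = s + dss_go n 0 := by
  have := dss_go_shift n.toNat n s 0 rfl
  simpa using this

-- single decimal digit: both evaluations give d^2
theorem dss_go_small (d : Nat) (hd : d < 10) : dss_go (d : Int) 0 = (d : Int) ^ 2 := by
  by_cases h0 : d = 0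
  · subst h0; rw [dss_go]; norm_num
  · have hpos : (0 : Int) < (d : Int) := by exact_mod_cast Nat.pos_of_ne_zero h0
    rw [dss_go, if_pos hpos]
    have hfd : PySem.Int.floordiv (d : Int) 10 = ((d / 10 : Nat) : Int) := by
      exact_mod_cast PySem.Int.floordiv_natCast d 10
    have hmd : PySem.Int.mod (d : Int) 10 = ((d % 10 : Nat) : Int) := by
      exact_mod_cast PySem.Int.mod_natCast d 10
    rw [hfd, hmd, Nat.div_eq_of_lt hd, Nat.mod_eq_of_lt hd]
    rw [dss_go]
    norm_num [sq]

-- int(str-digit) round trip for one decimal digit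
theorem ofStr_digitChar (d : Nat) (hd : d < 10) :
    (PySem.Int.ofStr? (String.singleton (Nat.digitChar d))).getD 0 = (d : Int) := by
  interval_cases d <;> decide

-- the char-by-char fold over Nat.toDigits 10 m equals the divmod loop
theorem fold_digits_eq (m : Nat) :
    (Nat.toDigits 10 m).foldl
      (fun sum c => sum + ((PySem.Int.ofStr? (String.singleton c)).getD 0) ^ 2) 0
    = dss_go (m : Int) 0 := by
  induction m using Nat.strong_induction_on with
  | _ m ih =>
    by_cases hm : m < 10
    · rw [Nat.toDigits_of_lt_base hm, List.foldl_cons, List.foldl_nil,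
          ofStr_digitChar m hm, dss_go_small m hm]
      ring
    · rw [Nat.toDigits_of_base_le (by norm_num) (by omega), List.foldl_append,
          ih (m / 10) (by omega), List.foldl_cons, List.foldl_nil,
          ofStr_digitChar (m % 10) (Nat.mod_lt _ (by norm_num))]
      have hpos : (0 : Int) < (m : Int) := by exact_mod_cast Nat.pos_of_ne_zero (by omega)
      conv_rhs => rw [dss_go]
      rw [if_pos hpos]
      have hfd : PySem.Int.floordiv (m : Int) 10 = ((m / 10 : Nat) : Int) := by
        exact_mod_cast PySem.Int.floordiv_natCast m 10
      have hmd : PySem.Int.mod (m : Int) 10 = ((m % 10 : Nat) : Int) := by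
        exact_mod_cast PySem.Int.mod_natCast m 10
      rw [hfd, hmd,
          dss_go_acc ((m / 10 : Nat) : Int) (0 + ((m % 10 : Nat) : Int) * ((m % 10 : Nat) : Int))]
      ring

-- on nonnegative inputs the two digit-square-sum helpers agree
theorem dss_eq (n : Int) (h : 0 ≤ n) : digit_square_sum n = digit_square_sum_b n := by
  obtain ⟨m, rfl⟩ := Int.eq_ofNat_of_zero_le h
  unfold digit_square_sum digit_square_sum_b
  rw [PySem.Int.toList_toStr]
  unfold PySem.Int.toChars
  rw [if_neg (by exact_mod_cast Int.natCast_nonneg m |>.not_gt), Int.toNat_natCast]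
  exact fold_digits_eq m

-- ===== VERDICT (by name: the statement is the Claim_ definition above) =====
theorem add_to_chain_lookup_spec : Claim_equal_add_to_chain_lookup := by
  intro n chain_cache _hDom hPre
  unfold Spec_add_to_chain_lookup add_to_chain_lookup add_to_chain_lookup_alt
  by_cases h : (PySem.Dict.mk chain_cache : PySem.Dict Int Int).contains n
  · -- cached: both return the stored value
    have hs : ((PySem.Dict.mk chain_cache : PySem.Dict Int Int).get? n).isSome := by
      rw [← PySem.Dict.contains_eq_isSome_get?]; exact h
    obtain ⟨v, hv⟩ := Option.isSome_iff_exists.mp hs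
    rw [addA, if_neg (by simp [h])]
    simp [hv]
  · -- not cached: both return the digit square sum of n
    have hn : (PySem.Dict.mk chain_cache : PySem.Dict Int Int).get? n = none := by
      rcases hget : (PySem.Dict.mk chain_cache : PySem.Dict Int Int).get? n with _ | v
      · rfl
      · exact absurd (by rw [PySem.Dict.contains_eq_isSome_get?, hget]; rfl) h
    have h0 : 0 ≤ n := by
      rcases hPre with h0 | hmem
      · exact h0
      · exact absurd ((PySem.Dict.contains_iff_mem_keys _ _).mpr (by simpa using hmem)) h
    rw [addA, if_pos (by simp [h])]
    simp only [hn]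
    split_ifs
    · exact dss_eq n h0
    · exact dss_eq n h0
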